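-- pv_equiv track=rewrite | github.com/Keeper-Security/Commander | keepercommander/commands/keeper_drive/sharing_commands.py | _collect_record_uids
-- ===== SOURCE A (Python) =====
-- def _collect_record_uids(kd_folders, kd_folder_records, folder_uid, recursive):
--     record_uids = set()
--
--     def walk(fuid, visited=None):
--         if visited is None:
--             visited = set()
--         if fuid in visited:
--             return
--         visited.add(fuid)
--         record_uids.update(kd_folder_records.get(fuid, set()))
--         if recursive:
--             for child_uid, child_obj in kd_folders.items():
--                 if child_obj.get('parent_uid') == fuid and child_uid not in visited:
--                     walk(child_uid, visited)
--
--     if folder_uid: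
--         walk(folder_uid)
--     else:
--         for fuid, recs in kd_folder_records.items():
--             if fuid not in kd_folders:
--                 record_uids.update(recs)
--         if recursive:
--             for fuid in list(kd_folders):
--                 walk(fuid)
--     return record_uids
-- ===== SOURCE B (Python) =====
-- def _collect_record_uids(kd_folders, kd_folder_records, folder_uid, recursive):
--     # Phase 1: build parent -> [children] adjacency once.
--     children = {}
--     for child_uid, child_obj in kd_folders.items():
--         children.setdefault(child_obj.get('parent_uid'), []).append(child_uid)
--
--     # Phase 2: compute the DFS preorder folder sequence (no record handling here).
--     def preorder(start):
--         seen = set()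
--         order = []
--
--         def go(f):
--             if f in seen:
--                 return
--             seen.add(f)
--             order.append(f)
--             if recursive:
--                 for c in children.get(f, ()):
--                     go(c)
--
--         go(start)
--         return order
--
--     record_uids = set()
--     if folder_uid:
--         visit_seq = preorder(folder_uid)
--     else:
--         for fuid, recs in kd_folder_records.items():
--             if fuid not in kd_folders:
--                 record_uids.update(recs)
--         visit_seq = []
--         if recursive:
--             for fuid in kd_folders:
--                 visit_seq.extend(preorder(fuid))
--
--     # Phase 3: collect records along the visit sequence.
--     for f in visit_seq:
--         record_uids.update(kd_folder_records.get(f, ()))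
--     return record_uids
-- ===== Notes on version B (the rewrite author's own statement) =====
-- stated objective: alternative
-- what changed: A interleaves record collection with a recursive walk that rescans every kd_folders entry at each visited folder; B is staged: it builds a parent->children adjacency dict once, computes the DFS preorder folder sequence from it, and only then collects records in one pass over that sequence.
import Mathlib
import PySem

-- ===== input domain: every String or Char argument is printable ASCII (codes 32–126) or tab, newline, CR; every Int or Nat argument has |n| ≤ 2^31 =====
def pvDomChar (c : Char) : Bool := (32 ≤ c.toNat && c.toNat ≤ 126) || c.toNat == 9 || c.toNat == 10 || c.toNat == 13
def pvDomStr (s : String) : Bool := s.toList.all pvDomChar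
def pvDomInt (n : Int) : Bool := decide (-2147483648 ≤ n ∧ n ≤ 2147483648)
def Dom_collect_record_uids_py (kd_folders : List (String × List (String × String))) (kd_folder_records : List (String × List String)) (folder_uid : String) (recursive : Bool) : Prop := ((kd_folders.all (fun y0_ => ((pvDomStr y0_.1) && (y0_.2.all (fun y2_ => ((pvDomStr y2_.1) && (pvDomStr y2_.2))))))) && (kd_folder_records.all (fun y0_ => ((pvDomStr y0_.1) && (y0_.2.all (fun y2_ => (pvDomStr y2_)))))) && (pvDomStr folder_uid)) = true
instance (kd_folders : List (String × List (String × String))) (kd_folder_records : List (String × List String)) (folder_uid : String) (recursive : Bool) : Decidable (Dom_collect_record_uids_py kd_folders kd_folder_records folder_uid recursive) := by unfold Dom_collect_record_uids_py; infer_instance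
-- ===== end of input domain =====

-- B is a staged re-implementation: a parent→children adjacency dict built once, a DFS
-- preorder pass computing only the folder visit sequence, then one separate pass collecting
-- records along that sequence (A interleaves collection with a walk that rescans all folders).

-- ===== PORT A =====

-- child_obj.get('parent_uid')  (inner dicts arrive as association lists); used by both Pythons
def pvParent (obj : List (String × String)) : Option String :=
  (PySem.Dict.mk obj).get? "parent_uid"

-- A's nested `walk(fuid, visited)`; state = (visited, record_uids).  Python's recursion
-- terminates because `visited` grows inside the finite key set; the fuel
-- kd_folders.length + 1 bounds the recursion depth (each nested call marks a fresh key).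
def pvWalkA (kdf : List (String × List (String × String))) (kfr : List (String × List String))
    (recursive : Bool) :
    Nat → String → PySem.Set String × PySem.Set String → PySem.Set String × PySem.Set String
  | 0, _, st => st
  | n+1, fuid, st =>
    if PySem.Set.contains st.1 fuid then st
    else
      let st1 : PySem.Set String × PySem.Set String :=
        (PySem.Set.add st.1 fuid,
         PySem.Set.update st.2 (((PySem.Dict.mk kfr).get? fuid).getD []))
      if recursive then
        kdf.foldl (fun s p =>
          if pvParent p.2 == some fuid && !(PySem.Set.contains s.1 p.1) then
            pvWalkA kdf kfr recursive n p.1 s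
          else s) st1
      else st1

def collect_record_uids_py (kd_folders : List (String × List (String × String))) (kd_folder_records : List (String × List String)) (folder_uid : String) (recursive : Bool) : List String :=
  if folder_uid ≠ "" then
    (pvWalkA kd_folders kd_folder_records recursive (kd_folders.length + 1) folder_uid
      (PySem.Set.empty, PySem.Set.empty)).2
  else
    let recs0 := kd_folder_records.foldl
      (fun recs p => if !(PySem.Dict.mk kd_folders).contains p.1 then PySem.Set.update recs p.2 else recs)
      PySem.Set.empty
    if recursive then
      kd_folders.foldl
        (fun recs p =>
          (pvWalkA kd_folders kd_folder_records recursive (kd_folders.length + 1) p.1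
            (PySem.Set.empty, recs)).2)
        recs0
    else recs0

-- ===== PORT B =====

-- Phase 1: children.setdefault(child_obj.get('parent_uid'), []).append(child_uid)
def pvKids (kdf : List (String × List (String × String))) :
    PySem.Dict (Option String) (List String) :=
  kdf.foldl (fun d p => d.modify (pvParent p.2) [] (fun l => l ++ [p.1])) (PySem.Dict.mk [])

-- Phase 2: the inner `go`; state = (order, seen); Python's recursion terminates because
-- every nested call marks a fresh kd_folders key, so kd_folders.length + 1 fuel suffices.
def pvGo (children : PySem.Dict (Option String) (List String)) (recursive : Bool) :
    Nat → String → List String × PySem.Set String → List String × PySem.Set String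
  | 0, _, st => st
  | n+1, f, st =>
    if PySem.Set.contains st.2 f then st
    else
      let st1 : List String × PySem.Set String := (st.1 ++ [f], PySem.Set.add st.2 f)
      if recursive then
        (children.getD (some f) []).foldl (fun s c => pvGo children recursive n c s) st1
      else st1

-- `preorder(start)`: fresh seen/order, return the order list
def pvPreorder (children : PySem.Dict (Option String) (List String)) (recursive : Bool)
    (fuel : Nat) (start : String) : List String :=
  (pvGo children recursive fuel start ([], PySem.Set.empty)).1

-- Phase 3: `for f in visit_seq: record_uids.update(kd_folder_records.get(f, ()))`
def pvCollect (kfr : List (String × List String)) (recs : PySem.Set String)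
    (seq : List String) : PySem.Set String :=
  seq.foldl (fun r f => PySem.Set.update r (((PySem.Dict.mk kfr).get? f).getD [])) recs

def collect_record_uids_py_alt (kd_folders : List (String × List (String × String))) (kd_folder_records : List (String × List String)) (folder_uid : String) (recursive : Bool) : List String :=
  let children := pvKids kd_folders
  if folder_uid ≠ "" then
    pvCollect kd_folder_records PySem.Set.empty
      (pvPreorder children recursive (kd_folders.length + 1) folder_uid)
  else
    let recs0 := kd_folder_records.foldl
      (fun recs p => if !(PySem.Dict.mk kd_folders).contains p.1 then PySem.Set.update recs p.2 else recs)
      PySem.Set.empty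
    let visitSeq : List String :=
      if recursive then
        kd_folders.foldl
          (fun acc p => acc ++ pvPreorder children recursive (kd_folders.length + 1) p.1) []
      else []
    pvCollect kd_folder_records recs0 visitSeq

-- ===== PRECONDITION & SPEC =====
def Spec_collect_record_uids_py (kd_folders : List (String × List (String × String))) (kd_folder_records : List (String × List String)) (folder_uid : String) (recursive : Bool) (out : List String) : Prop := out = collect_record_uids_py_alt kd_folders kd_folder_records folder_uid recursive
instance (kd_folders : List (String × List (String × String))) (kd_folder_records : List (String × List String)) (folder_uid : String) (recursive : Bool) (out : List String) : Decidable (Spec_collect_record_uids_py kd_folders kd_folder_records folder_uid recursive out) := by unfold Spec_collect_record_uids_py; infer_instance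

-- ===== CLAIM (what is proved, stated in full; the proofs are below) =====
def Claim_equal_collect_record_uids_py : Prop := ∀ (kd_folders : List (String × List (String × String))) (kd_folder_records : List (String × List String)) (folder_uid : String) (recursive : Bool), Dom_collect_record_uids_py kd_folders kd_folder_records folder_uid recursive → Spec_collect_record_uids_py kd_folders kd_folder_records folder_uid recursive (collect_record_uids_py kd_folders kd_folder_records folder_uid recursive)

-- ===== LEMMAS AND PROOFS =====

-- children of f found the way A finds them: scan kd_folders for parent_uid == f
def pvChildrenOf (kdf : List (String × List (String × String))) (f : String) : List String :=
  (kdf.filter (fun p => pvParent p.2 == some f)).map Prod.fst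

-- definitional unfoldings of the two recursions at successor fuel, in their literal Bool form
theorem pvWalkA_unfold (kdf : List (String × List (String × String))) (kfr : List (String × List String))
    (recursive : Bool) (n : Nat) (f : String) (vis recs : PySem.Set String) :
    pvWalkA kdf kfr recursive (n+1) f (vis, recs) =
      if PySem.Set.contains vis f then (vis, recs)
      else if recursive then
        kdf.foldl (fun s p =>
          if pvParent p.2 == some f && !(PySem.Set.contains s.1 p.1) then
            pvWalkA kdf kfr recursive n p.1 s
          else s)
          (PySem.Set.add vis f, PySem.Set.update recs (((PySem.Dict.mk kfr).get? f).getD []))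
      else (PySem.Set.add vis f, PySem.Set.update recs (((PySem.Dict.mk kfr).get? f).getD [])) := rfl

theorem pvGo_unfold (children : PySem.Dict (Option String) (List String)) (recursive : Bool)
    (n : Nat) (f : String) (ord : List String) (vis : PySem.Set String) :
    pvGo children recursive (n+1) f (ord, vis) =
      if PySem.Set.contains vis f then (ord, vis)
      else if recursive then
        (children.getD (some f) []).foldl (fun s c => pvGo children recursive n c s)
          (ord ++ [f], PySem.Set.add vis f)
      else (ord ++ [f], PySem.Set.add vis f) := rfl

-- A's walk is the identity on already-visited nodes
theorem pvWalkA_visited (kdf : List (String × List (String × String))) (kfr : List (String × List String))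
    (recursive : Bool) (n : Nat) (f : String) (st : PySem.Set String × PySem.Set String)
    (h : PySem.Set.contains st.1 f = true) : pvWalkA kdf kfr recursive n f st = st := by
  cases n with
  | zero => rfl
  | succ n => simp only [pvWalkA]; rw [if_pos h]

-- A's guarded scan over all folders IS the fold over the children of f
theorem pvWalkA_scan_eq (kdf : List (String × List (String × String))) (kfr : List (String × List String))
    (recursive : Bool) (n : Nat) (f : String) (st1 : PySem.Set String × PySem.Set String) :
    kdf.foldl (fun s p =>
        if pvParent p.2 == some f && !(PySem.Set.contains s.1 p.1) then
          pvWalkA kdf kfr recursive n p.1 s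
        else s) st1
      = (pvChildrenOf kdf f).foldl (fun s c => pvWalkA kdf kfr recursive n c s) st1 := by
  rw [pvChildrenOf, List.foldl_map, List.foldl_filter]
  refine PySem.List.foldl_congr_mem _ _ _ _ (fun s p _ => ?_)
  by_cases hp : (pvParent p.2 == some f) = true
  · simp only [hp, if_true]
    by_cases hc : PySem.Set.contains s.1 p.1 = true
    · have hm : p.1 ∈ s.1 := by simpa using hc
      rw [if_neg (by simp [hm]), pvWalkA_visited kdf kfr recursive n p.1 s hc]
    · have hm : p.1 ∉ s.1 := by simpa using hc
      rw [if_pos (by simp [hm])]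
  · simp [hp]

theorem pvKids_aux (l : List (String × List (String × String)))
    (d : PySem.Dict (Option String) (List String)) (q : Option String) :
    (l.foldl (fun d p => d.modify (pvParent p.2) [] (fun t => t ++ [p.1])) d).getD q []
      = d.getD q [] ++ (l.filter (fun p => pvParent p.2 == q)).map Prod.fst := by
  induction l generalizing d with
  | nil => simp
  | cons a t ih =>
    simp only [List.foldl_cons, ih, PySem.Dict.getD_modify, List.filter_cons]
    by_cases hq : pvParent a.2 = q
    · simp [hq]
    · simp [hq, Ne.symm hq]

-- the adjacency dict built by B lists exactly A's children, in scan order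
theorem pvKids_getD (kdf : List (String × List (String × String))) (f : String) :
    (pvKids kdf).getD (some f) [] = pvChildrenOf kdf f := by
  rw [pvKids, pvKids_aux, pvChildrenOf]
  simp [PySem.Dict.getD, PySem.Dict.get?]

-- collecting along a concatenated sequence = collecting in two stages
theorem pvCollect_append (kfr : List (String × List String)) (recs : PySem.Set String)
    (a b : List String) : pvCollect kfr recs (a ++ b) = pvCollect kfr (pvCollect kfr recs a) b := by
  simp [pvCollect, List.foldl_append]

-- the (order, seen) state: a nonempty starting order is a pure prefix of the result (fold form)
theorem pvGo_fold_prefix_of (children : PySem.Dict (Option String) (List String))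
    (recursive : Bool) (n : Nat)
    (h : ∀ f ord vis, pvGo children recursive n f (ord, vis)
        = (ord ++ (pvGo children recursive n f ([], vis)).1, (pvGo children recursive n f ([], vis)).2)) :
    ∀ (l : List String) (ord : List String) (vis : PySem.Set String),
      l.foldl (fun s c => pvGo children recursive n c s) (ord, vis)
        = (ord ++ (l.foldl (fun s c => pvGo children recursive n c s) ([], vis)).1,
           (l.foldl (fun s c => pvGo children recursive n c s) ([], vis)).2) := by
  intro l
  induction l with
  | nil => intro ord vis; simp
  | cons c t ih =>
    intro ord vis
    simp only [List.foldl_cons]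
    rw [h c ord vis]
    generalize pvGo children recursive n c ([], vis) = g
    obtain ⟨g1, g2⟩ := g
    dsimp only
    rw [ih (ord ++ g1) g2, ih g1 g2, List.append_assoc]

-- the (order, seen) state: a nonempty starting order is a pure prefix of the result
theorem pvGo_prefix (children : PySem.Dict (Option String) (List String)) (recursive : Bool) :
    ∀ (n : Nat) (f : String) (ord : List String) (vis : PySem.Set String),
      pvGo children recursive n f (ord, vis)
        = (ord ++ (pvGo children recursive n f ([], vis)).1, (pvGo children recursive n f ([], vis)).2) := by
  intro n
  induction n with
  | zero => intro f ord vis; simp [pvGo]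
  | succ n ih =>
    intro f ord vis
    rw [pvGo_unfold children recursive n f ord vis, pvGo_unfold children recursive n f [] vis]
    by_cases hc : PySem.Set.contains vis f = true
    · rw [if_pos hc, if_pos hc]; simp
    · rw [if_neg hc, if_neg hc]
      cases recursive with
      | false => simp
      | true =>
        rw [if_pos rfl, if_pos rfl,
            pvGo_fold_prefix_of children true n ih _ (ord ++ [f]),
            pvGo_fold_prefix_of children true n ih _ ([] ++ [f]),
            List.nil_append, List.append_assoc]

-- MAIN: A's walk = B's preorder followed by the collection pass (same fuel, same order)
theorem pvWalkA_eq_go (kdf : List (String × List (String × String))) (kfr : List (String × List String))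
    (recursive : Bool) :
    ∀ (n : Nat) (f : String) (vis recs : PySem.Set String),
      pvWalkA kdf kfr recursive n f (vis, recs)
        = ((pvGo (pvKids kdf) recursive n f ([], vis)).2,
           pvCollect kfr recs (pvGo (pvKids kdf) recursive n f ([], vis)).1) := by
  intro n
  induction n with
  | zero => intro f vis recs; simp [pvWalkA, pvGo, pvCollect]
  | succ n ih =>
    intro f vis recs
    have hfold : ∀ (l : List String) (vis recs : PySem.Set String),
        l.foldl (fun s c => pvWalkA kdf kfr recursive n c s) (vis, recs)
          = ((l.foldl (fun s c => pvGo (pvKids kdf) recursive n c s) ([], vis)).2,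
             pvCollect kfr recs (l.foldl (fun s c => pvGo (pvKids kdf) recursive n c s) ([], vis)).1) := by
      intro l
      induction l with
      | nil => intro vis recs; simp [pvCollect]
      | cons c t iht =>
        intro vis recs
        simp only [List.foldl_cons]
        rw [ih c vis recs]
        generalize pvGo (pvKids kdf) recursive n c ([], vis) = g
        obtain ⟨g1, g2⟩ := g
        dsimp only
        rw [iht g2 (pvCollect kfr recs g1),
            pvGo_fold_prefix_of (pvKids kdf) recursive n (pvGo_prefix (pvKids kdf) recursive n) t g1 g2]
        dsimp only
        rw [pvCollect_append]
    rw [pvWalkA_unfold, pvGo_unfold]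
    by_cases hc : PySem.Set.contains vis f = true
    · rw [if_pos hc, if_pos hc]; simp [pvCollect]
    · rw [if_neg hc, if_neg hc]
      cases recursive with
      | false => simp [pvCollect]
      | true =>
        rw [if_pos rfl, if_pos rfl, pvWalkA_scan_eq, pvKids_getD,
            hfold (pvChildrenOf kdf f) (PySem.Set.add vis f)
              (PySem.Set.update recs (((PySem.Dict.mk kfr).get? f).getD [])),
            pvGo_fold_prefix_of (pvKids kdf) true n (pvGo_prefix (pvKids kdf) true n)
              (pvChildrenOf kdf f) ([] ++ [f]) (PySem.Set.add vis f),
            List.nil_append]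
        dsimp only
        rw [pvCollect_append]
        simp [pvCollect]

-- the else-branch: A's fold of walks = one collection pass over B's concatenated preorders
theorem pv_else_eq (kdf : List (String × List (String × String))) (kfr : List (String × List String)) :
    ∀ (l : List (String × List (String × String))) (recs : PySem.Set String),
      l.foldl (fun recs p => (pvWalkA kdf kfr true (kdf.length + 1) p.1 (PySem.Set.empty, recs)).2) recs
        = pvCollect kfr recs
            (l.foldl (fun acc p => acc ++ pvPreorder (pvKids kdf) true (kdf.length + 1) p.1) []) := by
  intro l
  induction l with
  | nil => intro recs; simp [pvCollect]
  | cons p t ih =>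
    intro recs
    simp only [List.foldl_cons]
    rw [pvWalkA_eq_go kdf kfr true (kdf.length + 1) p.1 PySem.Set.empty recs, ih,
        PySem.List.foldl_append_eq_flatMap, PySem.List.foldl_append_eq_flatMap,
        List.nil_append, List.nil_append, pvCollect_append]
    rfl

-- ===== VERDICT (by name: the statement is the Claim_ definition above) =====
theorem collect_record_uids_py_spec : Claim_equal_collect_record_uids_py := by
  intro kdf kfr folder_uid recursive _
  unfold Spec_collect_record_uids_py collect_record_uids_py collect_record_uids_py_alt
  by_cases hf : folder_uid ≠ ""
  · rw [if_pos hf, if_pos hf,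
        pvWalkA_eq_go kdf kfr recursive (kdf.length + 1) folder_uid PySem.Set.empty PySem.Set.empty]
    rfl
  · rw [if_neg hf, if_neg hf]
    cases recursive with
    | false => simp [pvCollect]
    | true =>
      simp only [if_true]
      exact pv_else_eq kdf kfr kdf _
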